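-- pv_equiv track=rewrite | github.com/savaleyash004/PasswordShield | src/utils/feature_extraction.py | _seqNumberTransform
-- ===== SOURCE A (Python) =====
-- def _seqNumberTransform(text: str) -> int:
--     """Calculate the count of sequential numeric characters in the input text.
--
--     Args:
--         text (str): Input text.
--
--     Returns:
--         int: Count of sequential numeric characters in the input text.
--     """
--     sNumerics = "01234567890"
--     nSeqNumber = 0
--     for s in range(len(sNumerics) - 2):
--         sFwd = sNumerics[s : s + 3]
--         sRev = sFwd[::-1]
--         if sFwd in text.lower() or sRev in text.lower():
--             nSeqNumber += 1
--     return nSeqNumber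
-- ===== SOURCE B (Python) =====
-- def _seqNumberTransform(text: str) -> int:
--     """Count of sequential 3-digit patterns (forward or reverse) present in text."""
--     sNumerics = "01234567890"
--     table = {}
--     for s in range(len(sNumerics) - 2):
--         fwd = sNumerics[s : s + 3]
--         table[fwd] = s
--         table[fwd[::-1]] = s
--     t = text.lower()
--     found = set()
--     for i in range(len(t) - 2):
--         w = t[i : i + 3]
--         if w in table:
--             found.add(table[w])
--     return len(found)
-- ===== Notes on version B (the rewrite author's own statement) =====
-- stated objective: alternative
-- what changed: B precomputes a table mapping each sequential 3-digit string and its reverse to a pattern id, then makes a single windowed pass over the lowered text collecting hit ids in a set and returns the set's size, instead of A's nine separate substring searches (each re-lowering the text).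
import Mathlib
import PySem

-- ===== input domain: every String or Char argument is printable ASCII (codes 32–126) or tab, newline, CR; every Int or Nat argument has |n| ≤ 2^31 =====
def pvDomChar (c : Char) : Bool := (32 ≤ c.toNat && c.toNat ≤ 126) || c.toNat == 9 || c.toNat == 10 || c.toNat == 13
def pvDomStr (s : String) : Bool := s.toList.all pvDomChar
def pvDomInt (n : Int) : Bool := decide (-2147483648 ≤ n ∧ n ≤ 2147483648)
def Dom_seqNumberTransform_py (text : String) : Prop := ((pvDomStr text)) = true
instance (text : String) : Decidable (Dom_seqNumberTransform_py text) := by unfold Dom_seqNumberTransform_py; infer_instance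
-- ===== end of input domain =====

-- B replaces A's nine per-pattern substring searches by one precomputed pattern→id table,
-- a single windowed scan of the lowered text and a found-set; alternative decomposition, not claimed faster.

-- ===== PORT A =====
-- sFwd[::-1] is list reversal (PySem.List.slice?_none_none_neg_one)
def seqNumberTransform_py (text : String) : Int :=
  let sNumerics : List Char := "01234567890".toList
  (PySem.List.pyRange 0 ((sNumerics.length : Int) - 2) 1).foldl
    (fun nSeqNumber s =>
      let sFwd := PySem.List.slice sNumerics (some s) (some (s + 3))
      let sRev := sFwd.reverse
      if PySem.Chars.isIn sFwd (PySem.Chars.lower text.toList)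
          || PySem.Chars.isIn sRev (PySem.Chars.lower text.toList)
      then nSeqNumber + 1 else nSeqNumber) 0

-- ===== PORT B =====
-- the table Source B builds once: each sequential 3-digit run and its reverse, mapped to its pattern id
def pvTable : PySem.Dict (List Char) Int :=
  (PySem.List.pyRange 0 ((("01234567890".toList).length : Int) - 2) 1).foldl
    (fun d s =>
      let fwd := PySem.List.slice "01234567890".toList (some s) (some (s + 3))
      (d.insert fwd s).insert fwd.reverse s)
    PySem.Dict.empty

def seqNumberTransform_py_alt (text : String) : Int :=
  let t := PySem.Chars.lower text.toList
  let found := (PySem.List.pyRange 0 ((t.length : Int) - 2) 1).foldl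
    (fun (found : PySem.Set Int) i =>
      let w := PySem.List.slice t (some i) (some (i + 3))
      match PySem.Dict.get? pvTable w with
      | some id => found.add id
      | none => found)
    PySem.Set.empty
  PySem.Set.len found

-- ===== PRECONDITION & SPEC =====
def Spec_seqNumberTransform_py (text : String) (out : Int) : Prop := out = seqNumberTransform_py_alt text
instance (text : String) (out : Int) : Decidable (Spec_seqNumberTransform_py text out) := by unfold Spec_seqNumberTransform_py; infer_instance

-- ===== CLAIM (what is proved, stated in full; the proofs are below) =====
def Claim_equal_seqNumberTransform_py : Prop := ∀ (text : String), Dom_seqNumberTransform_py text → Spec_seqNumberTransform_py text (seqNumberTransform_py text)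

-- ===== LEMMAS AND PROOFS =====

-- the forward pattern at id s and the Boolean A tests for it
def pvFwd (s : Int) : List Char := PySem.List.slice "01234567890".toList (some s) (some (s + 3))

def pvP (t : List Char) (s : Int) : Bool :=
  PySem.Chars.isIn (pvFwd s) t || PySem.Chars.isIn (pvFwd s).reverse t

lemma A_eq (text : String) :
    seqNumberTransform_py text =
      List.foldl (fun n s => if pvP (PySem.Chars.lower text.toList) s then n + 1 else n) 0
        ([0,1,2,3,4,5,6,7,8] : List Int) := by
  have hr : PySem.List.pyRange 0 ((("01234567890".toList).length : Int) - 2) 1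
      = ([0,1,2,3,4,5,6,7,8] : List Int) := by decide
  simp only [seqNumberTransform_py, hr, pvP, pvFwd]
  rfl

set_option maxHeartbeats 2000000 in
lemma pvTable_eq : pvTable = PySem.Dict.mk [(['0','1','2'],0),(['2','1','0'],0),(['1','2','3'],1),(['3','2','1'],1),(['2','3','4'],2),(['4','3','2'],2),(['3','4','5'],3),(['5','4','3'],3),(['4','5','6'],4),(['6','5','4'],4),(['5','6','7'],5),(['7','6','5'],5),(['6','7','8'],6),(['8','7','6'],6),(['7','8','9'],7),(['9','8','7'],7),(['8','9','0'],8),(['0','9','8'],8)] := by decide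

set_option maxHeartbeats 2000000 in
lemma get?_pvTable (w : List Char) (x : Int) :
  PySem.Dict.get? pvTable w = some x ↔
  ((x = 0 ∧ (w = pvFwd 0 ∨ w = (pvFwd 0).reverse)) ∨
   (x = 1 ∧ (w = pvFwd 1 ∨ w = (pvFwd 1).reverse)) ∨
   (x = 2 ∧ (w = pvFwd 2 ∨ w = (pvFwd 2).reverse)) ∨
   (x = 3 ∧ (w = pvFwd 3 ∨ w = (pvFwd 3).reverse)) ∨
   (x = 4 ∧ (w = pvFwd 4 ∨ w = (pvFwd 4).reverse)) ∨
   (x = 5 ∧ (w = pvFwd 5 ∨ w = (pvFwd 5).reverse)) ∨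
   (x = 6 ∧ (w = pvFwd 6 ∨ w = (pvFwd 6).reverse)) ∨
   (x = 7 ∧ (w = pvFwd 7 ∨ w = (pvFwd 7).reverse)) ∨
   (x = 8 ∧ (w = pvFwd 8 ∨ w = (pvFwd 8).reverse))) := by
  constructor
  · intro h
    have hm := PySem.Dict.mem_items_of_get?_eq_some pvTable h
    rw [pvTable_eq] at hm
    simp only [List.mem_cons, List.not_mem_nil, or_false, Prod.mk.injEq] at hm
    simp only [pvFwd]
    tauto
  · simp only [pvFwd]
    rintro (⟨rfl, rfl | rfl⟩ | ⟨rfl, rfl | rfl⟩ | ⟨rfl, rfl | rfl⟩ | ⟨rfl, rfl | rfl⟩ |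
            ⟨rfl, rfl | rfl⟩ | ⟨rfl, rfl | rfl⟩ | ⟨rfl, rfl | rfl⟩ | ⟨rfl, rfl | rfl⟩ |
            ⟨rfl, rfl | rfl⟩) <;> decide

-- a length-3 list is an infix of t exactly when it is one of the windows t[i:i+3], i ∈ range(len(t)-2)
lemma window_infix (t p : List Char) (hp : p.length = 3) :
    (∃ i ∈ PySem.List.pyRange 0 ((t.length : Int) - 2) 1,
        PySem.List.slice t (some i) (some (i + 3)) = p) ↔ p <:+: t := by
  constructor
  · rintro ⟨i, hi, hs⟩
    rw [PySem.List.mem_pyRange_one] at hi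
    rw [PySem.List.slice_toNat _ hi.1 (by omega)] at hs
    calc p = List.take ((i+3).toNat - i.toNat) (List.drop i.toNat t) := hs.symm
    _ <:+: List.drop i.toNat t := (List.take_prefix _ _).isInfix
    _ <:+: t := (List.drop_suffix _ _).isInfix
  · rintro ⟨pre, suf, h⟩
    refine ⟨(pre.length : Int), ?_, ?_⟩
    · rw [PySem.List.mem_pyRange_one]
      have : t.length = pre.length + 3 + suf.length := by
        subst h; simp [hp]; omega
      omega
    · rw [PySem.List.slice_toNat _ (by positivity) (by positivity)]
      have h3 : ((pre.length : Int) + 3).toNat - ((pre.length : Int)).toNat = 3 := by omega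
      rw [h3, Int.toNat_natCast, ← h, List.append_assoc, List.drop_left]
      exact List.take_left' hp

-- membership in B's found-set after the scan
lemma mem_scan (t : List Char) (l : List Int) (acc : PySem.Set Int) (x : Int) :
    x ∈ l.foldl (fun (found : PySem.Set Int) i =>
        match PySem.Dict.get? pvTable (PySem.List.slice t (some i) (some (i + 3))) with
        | some id => found.add id
        | none => found) acc ↔
      x ∈ acc ∨ ∃ i ∈ l,
        PySem.Dict.get? pvTable (PySem.List.slice t (some i) (some (i + 3))) = some x := by
  induction l generalizing acc with
  | nil => simp
  | cons i rest ih =>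
    simp only [List.foldl_cons, ih, List.mem_cons]
    cases hg : PySem.Dict.get? pvTable (PySem.List.slice t (some i) (some (i + 3))) with
    | none =>
      constructor
      · rintro (h | h)
        · exact Or.inl h
        · obtain ⟨j, hj, hx⟩ := h; exact Or.inr ⟨j, Or.inr hj, hx⟩
      · rintro (h | ⟨j, hj | hj, hx⟩)
        · exact Or.inl h
        · subst hj; rw [hg] at hx; cases hx
        · exact Or.inr ⟨j, hj, hx⟩
    | some id =>
      rw [PySem.Set.mem_add]
      constructor
      · rintro ((h | rfl) | h)
        · exact Or.inl h
        · exact Or.inr ⟨i, Or.inl rfl, hg⟩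
        · obtain ⟨j, hj, hx⟩ := h; exact Or.inr ⟨j, Or.inr hj, hx⟩
      · rintro (h | ⟨j, hj | hj, hx⟩)
        · exact Or.inl (Or.inl h)
        · subst hj; rw [hg] at hx; exact Or.inl (Or.inr (Option.some.injEq _ _ ▸ hx.symm))
        · exact Or.inr ⟨j, hj, hx⟩

lemma nodup_scan (t : List Char) (l : List Int) (acc : PySem.Set Int) (h : acc.Nodup) :
    (l.foldl (fun (found : PySem.Set Int) i =>
        match PySem.Dict.get? pvTable (PySem.List.slice t (some i) (some (i + 3))) with
        | some id => found.add id
        | none => found) acc).Nodup := by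
  induction l generalizing acc with
  | nil => simpa
  | cons i rest ih =>
    simp only [List.foldl_cons]
    cases hg : PySem.Dict.get? pvTable (PySem.List.slice t (some i) (some (i + 3))) with
    | none => exact ih acc h
    | some id => exact ih _ (PySem.Set.nodup_add acc id h)

lemma mem_scan_iff_filter (t : List Char) (x : Int) :
    (∃ i ∈ PySem.List.pyRange 0 ((t.length : Int) - 2) 1,
        PySem.Dict.get? pvTable (PySem.List.slice t (some i) (some (i + 3))) = some x) ↔
      x ∈ ([0,1,2,3,4,5,6,7,8] : List Int).filter (fun s => pvP t s) := by
  have hw : ∀ s : Int, s ∈ ([0,1,2,3,4,5,6,7,8] : List Int) →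
      ((∃ i ∈ PySem.List.pyRange 0 ((t.length : Int) - 2) 1,
          PySem.List.slice t (some i) (some (i + 3)) = pvFwd s ∨
          PySem.List.slice t (some i) (some (i + 3)) = (pvFwd s).reverse) ↔ pvP t s = true) := by
    intro s hs
    have hlen : (pvFwd s).length = 3 := by
      fin_cases hs <;> decide
    have hlen' : ((pvFwd s).reverse).length = 3 := by simpa
    rw [pvP, Bool.or_eq_true, PySem.Chars.isIn_iff_infix, PySem.Chars.isIn_iff_infix,
        ← window_infix t _ hlen, ← window_infix t _ hlen']
    constructor
    · rintro ⟨i, hi, h | h⟩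
      · exact Or.inl ⟨i, hi, h⟩
      · exact Or.inr ⟨i, hi, h⟩
    · rintro (⟨i, hi, h⟩ | ⟨i, hi, h⟩)
      · exact ⟨i, hi, Or.inl h⟩
      · exact ⟨i, hi, Or.inr h⟩
  simp only [List.mem_filter]
  constructor
  · rintro ⟨i, hi, hg⟩
    rw [get?_pvTable] at hg
    rcases hg with ⟨rfl, h⟩ | ⟨rfl, h⟩ | ⟨rfl, h⟩ | ⟨rfl, h⟩ | ⟨rfl, h⟩ | ⟨rfl, h⟩ | ⟨rfl, h⟩ | ⟨rfl, h⟩ | ⟨rfl, h⟩ <;>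
      refine ⟨by decide, ((hw _ (by decide)).mp ⟨i, hi, by tauto⟩)⟩
  · rintro ⟨hx, hp⟩
    obtain ⟨i, hi, h⟩ := (hw x hx).mpr hp
    have hx' : x = 0 ∨ x = 1 ∨ x = 2 ∨ x = 3 ∨ x = 4 ∨ x = 5 ∨ x = 6 ∨ x = 7 ∨ x = 8 := by
      simpa using hx
    refine ⟨i, hi, (get?_pvTable _ _).mpr ?_⟩
    rcases hx' with rfl | rfl | rfl | rfl | rfl | rfl | rfl | rfl | rfl
    · exact Or.inl ⟨rfl, h⟩
    · exact Or.inr (Or.inl ⟨rfl, h⟩)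
    · exact Or.inr (Or.inr (Or.inl ⟨rfl, h⟩))
    · exact Or.inr (Or.inr (Or.inr (Or.inl ⟨rfl, h⟩)))
    · exact Or.inr (Or.inr (Or.inr (Or.inr (Or.inl ⟨rfl, h⟩))))
    · exact Or.inr (Or.inr (Or.inr (Or.inr (Or.inr (Or.inl ⟨rfl, h⟩)))))
    · exact Or.inr (Or.inr (Or.inr (Or.inr (Or.inr (Or.inr (Or.inl ⟨rfl, h⟩))))))
    · exact Or.inr (Or.inr (Or.inr (Or.inr (Or.inr (Or.inr (Or.inr (Or.inl ⟨rfl, h⟩)))))))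
    · exact Or.inr (Or.inr (Or.inr (Or.inr (Or.inr (Or.inr (Or.inr (Or.inr ⟨rfl, h⟩)))))))

-- ===== VERDICT (by name: the statement is the Claim_ definition above) =====
theorem seqNumberTransform_py_spec : Claim_equal_seqNumberTransform_py := by
  intro text _
  unfold Spec_seqNumberTransform_py
  set t := PySem.Chars.lower text.toList with ht
  rw [A_eq]
  show _ = seqNumberTransform_py_alt text
  simp only [seqNumberTransform_py_alt, ← ht]
  rw [PySem.List.foldl_count_if, List.countP_eq_length_filter]
  set found := (PySem.List.pyRange 0 ((t.length : Int) - 2) 1).foldl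
    (fun (found : PySem.Set Int) i =>
      match PySem.Dict.get? pvTable (PySem.List.slice t (some i) (some (i + 3))) with
      | some id => found.add id
      | none => found) PySem.Set.empty with hfound
  have h1 : found.Nodup := nodup_scan t _ _ (by exact List.nodup_nil)
  have h2 : (([0,1,2,3,4,5,6,7,8] : List Int).filter (fun s => pvP t s)).Nodup :=
    List.Nodup.filter _ (by decide)
  have hperm : found.Perm (([0,1,2,3,4,5,6,7,8] : List Int).filter (fun s => pvP t s)) := by
    refine (List.perm_ext_iff_of_nodup h1 h2).mpr fun x => ?_
    rw [hfound, mem_scan]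
    simpa using mem_scan_iff_filter t x
  have hlen : PySem.Set.len found = (found.length : Int) := rfl
  rw [hlen, hperm.length_eq]
  simp
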